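-- pv_equiv track=rewrite | github.com/hakanlundvall/aoc2023 | d7.py | hand_value2
-- ===== SOURCE A (Python) =====
-- from collections import Counter
--
-- def generate_joker_values(n):
--     if n == 0:
--         yield []
--     else:
--         tail = list(generate_joker_values(n-1))
--         for i in range(2,15):
--             for t in tail:
--                 res = [i, *t]
--                 yield res
--
-- def hand_value(h, original=None):
--     hand, _ = h
--     if original is None:
--         original = hand
--     counted = Counter(hand).most_common()
--     m = max([n for _,n in counted])
--     l = len(counted)
--     if m == 5:
--         return [6, *original]
--     elif m == 4:
--         return [5, *original]
--     elif l == 2: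
--         return [4, *original]
--     elif m == 3:
--         return [3, *original]
--     elif l == 3:
--         return [2, *original]
--     elif m == 2:
--         return [1, *original]
--     else:
--         return [0, *original]
--
-- def hand_value2(h):
--     hand, _ = h
--     hand = [c if c != 11 else 1 for c in hand]
--     original = hand.copy()
--     jokers = [i for i, x in enumerate(hand) if x == 1]
--     joker_values = generate_joker_values(len(jokers))
--
--     maxval = []
--     for jv in joker_values:
--         for j, v in zip(jokers, jv):
--             hand[j] = v
--         v = hand_value((hand, _), original)
--         if v > maxval:
--             maxval = v
--     return maxval
-- ===== SOURCE B (Python) =====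
-- from collections import Counter
--
--
-- def _nondecr(n, lo):
--     # all nondecreasing joker-value lists of length n with entries in [lo, 14]
--     if n == 0:
--         yield []
--     else:
--         for i in range(lo, 15):
--             for t in _nondecr(n - 1, i):
--                 yield [i, *t]
--
--
-- def hand_value2(h):
--     hand, _ = h
--     hand = [1 if c == 11 else c for c in hand]
--     rest = [c for c in hand if c != 1]
--     k = len(hand) - len(rest)
--     base = Counter(rest)
--     best = -1
--     for jv in _nondecr(k, 2):
--         cnt = base.copy()
--         cnt.update(jv)
--         m = max(cnt.values())
--         l = len(cnt)
--         if m == 5: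
--             c = 6
--         elif m == 4:
--             c = 5
--         elif l == 2:
--             c = 4
--         elif m == 3:
--             c = 3
--         elif l == 3:
--             c = 2
--         elif m == 2:
--             c = 1
--         else:
--             c = 0
--         if c > best:
--             best = c
--     return [best, *hand]
-- ===== Notes on version B (the rewrite author's own statement) =====
-- stated objective: alternative
-- what changed: B enumerates joker assignments as nondecreasing value-multisets (C(k+12,12) of them, polynomial in the joker count k) updating a Counter of the non-joker cards built once, instead of A's 13^k ordered tuples each substituted back into the hand and re-counted; the category is computed from max-count and distinct-count directly without sorting a most_common list.
import Mathlib
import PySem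

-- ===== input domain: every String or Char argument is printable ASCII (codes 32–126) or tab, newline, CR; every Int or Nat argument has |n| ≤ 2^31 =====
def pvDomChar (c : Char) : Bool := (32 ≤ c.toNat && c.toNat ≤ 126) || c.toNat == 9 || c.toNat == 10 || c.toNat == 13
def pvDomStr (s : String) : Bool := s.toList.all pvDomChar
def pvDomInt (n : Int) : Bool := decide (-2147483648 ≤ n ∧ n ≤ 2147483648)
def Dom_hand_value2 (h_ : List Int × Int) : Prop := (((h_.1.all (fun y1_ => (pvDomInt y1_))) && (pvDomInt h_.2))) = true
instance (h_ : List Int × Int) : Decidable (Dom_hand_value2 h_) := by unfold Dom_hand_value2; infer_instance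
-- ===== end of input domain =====

-- B enumerates joker assignments as nondecreasing multisets over a Counter of the non-joker
-- cards instead of A's 13^k ordered tuples substituted into the hand (objective: alternative).

-- ===== PORT A =====
-- Python's lexicographic '<' on lists of ints ('v > maxval'); hand-ported, exact for int lists.
def pyLt : List Int → List Int → Bool
  | _, [] => false
  | [], _ :: _ => true
  | a :: as, b :: bs => a < b || (a == b && pyLt as bs)

def generate_joker_values : Nat → List (List Int)
  | 0 => [[]]
  | n + 1 =>
      let tail := generate_joker_values n
      (PySem.List.pyRange 2 15 1).flatMap (fun i => tail.map (fun t => i :: t))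

def hand_value (h : List Int × Int) (original : Option (List Int)) : List Int :=
  let hand := h.1
  let orig := original.getD hand
  let counted := PySem.List.sorted (PySem.Dict.counter hand).items (fun p => p.2) true
  -- max([n for _,n in counted]) raises ValueError when hand = []; none (ValueError) is excluded by Pre_
  let m := (PySem.List.max? (counted.map (fun p => p.2)) (fun x => x)).getD 0
  let l : Int := counted.length
  if m == 5 then 6 :: orig
  else if m == 4 then 5 :: orig
  else if l == 2 then 4 :: orig
  else if m == 3 then 3 :: orig
  else if l == 3 then 2 :: orig
  else if m == 2 then 1 :: orig
  else 0 :: orig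

def hand_value2 (h_ : List Int × Int) : List Int :=
  let hand := h_.1.map (fun c => if c != 11 then c else 1)
  let original := hand
  let jokers := ((PySem.List.enumerate hand 0).filter (fun p => p.2 == 1)).map (fun p => p.1)
  let joker_values := generate_joker_values jokers.length
  let st := joker_values.foldl (fun (st : List Int × List Int) jv =>
      -- hand[j] = v for j, v in zip(jokers, jv): j comes from enumerate, so 0 ≤ j < len(hand); .set j.toNat is exact
      let hand' := (jokers.zip jv).foldl (fun h p => h.set p.1.toNat p.2) st.1
      let v := hand_value (hand', h_.2) (some original)
      (hand', if pyLt st.2 v then v else st.2)) (hand, [])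
  st.2

-- ===== PORT B =====
def nondecr : Nat → Int → List (List Int)
  | 0, _ => [[]]
  | n + 1, lo => (PySem.List.pyRange lo 15 1).flatMap (fun i => (nondecr n i).map (fun t => i :: t))

def catOf (m l : Int) : Int :=
  if m == 5 then 6 else if m == 4 then 5 else if l == 2 then 4
  else if m == 3 then 3 else if l == 3 then 2 else if m == 2 then 1 else 0

def hand_value2_alt (h_ : List Int × Int) : List Int :=
  let hand := h_.1.map (fun c => if c == 11 then 1 else c)
  let rest := hand.filter (fun c => !(c == 1))
  let k := hand.length - rest.length
  let base := PySem.Dict.counter rest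
  let best := (nondecr k 2).foldl (fun best jv =>
      let cnt := jv.foldl (fun d x => d.modify x 0 (· + 1)) base   -- cnt = base.copy(); cnt.update(jv)
      -- max(cnt.values()) raises ValueError when the hand is empty; excluded by Pre_
      let m := (PySem.List.max? cnt.values (fun x => x)).getD 0
      let l : Int := cnt.size
      let c := catOf m l
      if best < c then c else best) (-1)
  best :: hand

-- ===== PRECONDITION & SPEC =====
-- Pre_ excludes only the empty hand, on which Python's A raises ValueError (max() of an empty sequence).
def Pre_hand_value2 (h_ : List Int × Int) : Prop := h_.1 ≠ []
instance (h_ : List Int × Int) : Decidable (Pre_hand_value2 h_) := by unfold Pre_hand_value2; infer_instance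
def pvWitness_hand_value2 : (List Int × Int) := ([2, 2, 11, 3, 4], 7)

def Spec_hand_value2 (h_ : List Int × Int) (out : List Int) : Prop := out = hand_value2_alt h_
instance (h_ : List Int × Int) (out : List Int) : Decidable (Spec_hand_value2 h_ out) := by unfold Spec_hand_value2; infer_instance

-- ===== CLAIM (what is proved, stated in full; the proofs are below) =====
def Claim_equal_hand_value2 : Prop := ∀ (h_ : List Int × Int), Dom_hand_value2 h_ → Pre_hand_value2 h_ → Spec_hand_value2 h_ (hand_value2 h_)

-- ===== LEMMAS AND PROOFS =====

-- The category both programs compute from a counter dict: max of the counts, number of keys.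
def catStats (d : PySem.Dict Int Int) : Int :=
  catOf ((PySem.List.max? d.values (fun x => x)).getD 0) d.size

-- merge2 t h jv: h with the values at t's 1-positions replaced, in order, by jv (used with h.length = t.length)
def merge2 : List Int → List Int → List Int → List Int
  | [], _, _ => []
  | _ :: _, [], _ => []
  | c :: t, x :: h, jv =>
      if c = 1 then
        match jv with
        | v :: jv' => v :: merge2 t h jv'
        | [] => x :: merge2 t h []
      else x :: merge2 t h jv

def jokersOf (l : List Int) : List Int :=
  ((PySem.List.enumerate l 0).filter (fun p => p.2 == 1)).map (fun p => p.1)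

def phi (orig : List Int) (b : Int) : List Int := if b < 0 then [] else b :: orig

-- one iteration of A's loop over joker assignments, as the port's step function
def stepA (hand1 : List Int) (bid : Int) (st : List Int × List Int) (jv : List Int) :
    List Int × List Int :=
  let hand' := ((jokersOf hand1).zip jv).foldl (fun h p => h.set p.1.toNat p.2) st.1
  let v := hand_value (hand', bid) (some hand1)
  (hand', if pyLt st.2 v then v else st.2)

theorem pyLt_self (l : List Int) : pyLt l l = false := by
  induction l with
  | nil => rfl
  | cons a t ih => simp [pyLt, ih]

theorem catOf_nonneg (m l : Int) : 0 ≤ catOf m l := by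
  unfold catOf; split_ifs <;> norm_num

theorem enum_shift (xs : List Int) (s : Int) :
    PySem.List.enumerate xs (s + 1) = (PySem.List.enumerate xs s).map (fun p => (p.1 + 1, p.2)) := by
  induction xs generalizing s with
  | nil => simp [PySem.List.enumerate_nil]
  | cons a t ih =>
      simp only [PySem.List.enumerate_cons, List.map_cons]
      rw [show s + 1 + 1 = (s + 1) + 1 by ring, ih (s+1)]

theorem jokersOf_cons (c : Int) (t : List Int) :
    jokersOf (c :: t) = (if c = 1 then [(0 : Int)] else []) ++ (jokersOf t).map (fun i => i + 1) := by
  unfold jokersOf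
  rw [PySem.List.enumerate_cons, show (0:Int) + 1 = 0 + 1 by rfl, enum_shift]
  rw [List.filter_cons, List.filter_map]
  by_cases h : c = 1 <;> simp [h, Function.comp_def]

theorem jokersOf_nonneg (l : List Int) : ∀ j ∈ jokersOf l, 0 ≤ j := by
  induction l with
  | nil => simp [jokersOf, PySem.List.enumerate_nil]
  | cons c t ih =>
      intro j hj
      rw [jokersOf_cons] at hj
      rcases List.mem_append.1 hj with h | h
      · split at h <;> simp_all
      · obtain ⟨i, hi, rfl⟩ := List.mem_map.1 h
        have := ih i hi; omega

theorem jokersOf_length (l : List Int) : (jokersOf l).length = l.count 1 := by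
  induction l with
  | nil => simp [jokersOf, PySem.List.enumerate_nil]
  | cons c t ih =>
      rw [jokersOf_cons]
      by_cases h : c = 1 <;> simp [h, ih]
theorem merge2_length (t : List Int) : ∀ h jv : List Int, h.length = t.length →
    (merge2 t h jv).length = t.length := by
  induction t with
  | nil => intro h jv _; simp [merge2]
  | cons c t ih =>
      intro h jv hl
      match h with
      | [] => simp at hl
      | x :: h =>
          simp only [List.length_cons] at hl
          have hl' : h.length = t.length := by omega
          by_cases hc : c = 1
          · cases jv <;> simp [merge2, hc, ih h _ hl']
          · simp [merge2, hc, ih h jv hl']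

theorem merge2_nil_jv (t : List Int) : ∀ h : List Int, h.length = t.length → merge2 t h [] = h := by
  induction t with
  | nil =>
      intro h hl
      rw [List.length_nil, List.length_eq_zero_iff] at hl
      subst hl; rfl
  | cons c t ih =>
      intro h hl
      match h with
      | [] => simp at hl
      | x :: h =>
          simp only [List.length_cons] at hl
          have hl' : h.length = t.length := by omega
          by_cases hc : c = 1 <;> simp [merge2, hc, ih h hl']

theorem shiftFold (js : List Int) : ∀ (jv : List Int) (a : Int) (h : List Int), (∀ j ∈ js, 0 ≤ j) →
    ((js.map (fun i => i + 1)).zip jv).foldl (fun h p => h.set p.1.toNat p.2) (a :: h)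
      = a :: (js.zip jv).foldl (fun h p => h.set p.1.toNat p.2) h := by
  induction js with
  | nil => intro jv a h _; simp
  | cons j js ih =>
      intro jv a h hnn
      match jv with
      | [] => simp
      | v :: jv' =>
          have hj : (0:Int) ≤ j := hnn j (by simp)
          have ht : (j + 1).toNat = j.toNat + 1 := by omega
          simp only [List.map_cons, List.zip_cons_cons, List.foldl_cons, ht, List.set_cons_succ]
          exact ih jv' a (h.set j.toNat v) (fun x hx => hnn x (by simp [hx]))

theorem subst_eq_merge2 (t : List Int) : ∀ (h jv : List Int), h.length = t.length →
    ((jokersOf t).zip jv).foldl (fun h p => h.set p.1.toNat p.2) h = merge2 t h jv := by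
  induction t with
  | nil =>
      intro h jv hl
      rw [List.length_nil, List.length_eq_zero_iff] at hl; subst hl
      simp [jokersOf, PySem.List.enumerate_nil, merge2]
  | cons c t ih =>
      intro h jv hl
      match h with
      | [] => simp at hl
      | x :: h =>
          simp only [List.length_cons] at hl
          have hl' : h.length = t.length := by omega
          have hnn := jokersOf_nonneg t
          rw [jokersOf_cons]
          by_cases hc : c = 1
          · rw [if_pos hc]
            match jv with
            | [] =>
                simp [merge2, hc, merge2_nil_jv t h hl']
            | v :: jv' =>
                rw [List.cons_append, List.nil_append, List.zip_cons_cons, List.foldl_cons]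
                have h0 : ((0:Int).toNat) = 0 := rfl
                rw [h0, List.set_cons_zero, shiftFold _ _ _ _ hnn, ih h jv' hl']
                simp [merge2, hc]
          · rw [if_neg hc, List.nil_append]
            rw [shiftFold _ _ _ _ hnn, ih h jv hl']
            simp [merge2, hc]

theorem merge2_cons_one (t h jv : List Int) (x v : Int) :
    merge2 (1 :: t) (x :: h) (v :: jv) = v :: merge2 t h jv := by simp [merge2]

theorem merge2_cons_one_nil (t h : List Int) (x : Int) :
    merge2 (1 :: t) (x :: h) [] = x :: merge2 t h [] := by simp [merge2]

theorem merge2_cons_ne (c : Int) (t h jv : List Int) (x : Int) (h1 : c ≠ 1) :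
    merge2 (c :: t) (x :: h) jv = x :: merge2 t h jv := by
  cases jv <;> simp [merge2, h1]

theorem merge2_overwrite (t : List Int) : ∀ (h jv jv' : List Int), h.length = t.length →
    t.count 1 ≤ jv.length →
    merge2 t (merge2 t h jv') jv = merge2 t h jv := by
  induction t with
  | nil => intro h jv jv' _ _; simp [merge2]
  | cons c t ih =>
      intro h jv jv' hl hc
      match h with
      | [] => simp at hl
      | x :: h =>
          simp only [List.length_cons] at hl
          have hl' : h.length = t.length := by omega
          by_cases h1 : c = 1
          · subst h1
            rw [List.count_cons_self] at hc
            match jv with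
            | [] => simp at hc
            | v :: jv2 =>
                have hc2 : t.count 1 ≤ jv2.length := by
                  simp only [List.length_cons] at hc; omega
                match jv' with
                | [] =>
                    rw [merge2_cons_one_nil, merge2_cons_one, merge2_cons_one,
                      ih h jv2 [] hl' hc2]
                | v' :: jv2' =>
                    rw [merge2_cons_one, merge2_cons_one, merge2_cons_one,
                      ih h jv2 jv2' hl' hc2]
          · have hcount : t.count 1 ≤ jv.length := by
              rw [List.count_cons_of_ne h1] at hc; exact hc
            rw [merge2_cons_ne _ _ _ _ _ h1, merge2_cons_ne _ _ _ _ _ h1,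
              merge2_cons_ne _ _ _ _ _ h1, ih h jv jv' hl' hcount]

theorem merge2_perm (t : List Int) : ∀ jv : List Int, jv.length = t.count 1 →
    (merge2 t t jv).Perm (t.filter (fun c => !(c == 1)) ++ jv) := by
  induction t with
  | nil => intro jv h; simp at h; simp [merge2, h]
  | cons c t ih =>
      intro jv hc
      by_cases h1 : c = 1
      · subst h1
        rw [List.count_cons_self] at hc
        match jv with
        | [] => simp at hc
        | v :: jv' =>
            have hlen : jv'.length = t.count 1 := by
              simp only [List.length_cons] at hc; omega
            rw [merge2_cons_one]
            have hf : (1 :: t).filter (fun c => !(c == 1)) = t.filter (fun c => !(c == 1)) := by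
              simp
            rw [hf]
            exact (List.Perm.cons v (ih jv' hlen)).trans List.perm_middle.symm
      · have hlen : jv.length = t.count 1 := by
          rwa [List.count_cons_of_ne h1] at hc
        rw [merge2_cons_ne _ _ _ _ _ h1]
        have hf : (c :: t).filter (fun c => !(c == 1)) = c :: t.filter (fun c => !(c == 1)) := by
          simp [h1]
        rw [hf, List.cons_append]
        exact List.Perm.cons c (ih jv hlen)

theorem max?_id_perm (l₁ l₂ : List Int) (hp : l₁.Perm l₂) :
    PySem.List.max? l₁ (fun x => x) = PySem.List.max? l₂ (fun x => x) := by
  match e1 : PySem.List.max? l₁ (fun x => x), e2 : PySem.List.max? l₂ (fun x => x) with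
  | none, none => rfl
  | none, some m =>
      rw [PySem.List.max?_eq_none_iff] at e1
      subst e1
      rw [(List.Perm.nil_eq hp).symm] at e2  -- l₂ = []
      simp [PySem.List.max?] at e2
  | some m, none =>
      rw [PySem.List.max?_eq_none_iff] at e2
      subst e2
      rw [List.Perm.eq_nil hp] at e1
      simp [PySem.List.max?] at e1
  | some m1, some m2 =>
      have h1 := PySem.List.max?_mem e1
      have h2 := PySem.List.max?_mem e2
      have b1 := PySem.List.max?_isMax e1
      have b2 := PySem.List.max?_isMax e2
      have le1 : m1 ≤ m2 := b2 m1 (hp.mem_iff.1 h1)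
      have le2 : m2 ≤ m1 := b1 m2 (hp.mem_iff.2 h2)
      exact congrArg some (le_antisymm le2 le1).symm

theorem set_perm (l₁ l₂ : List Int) (hp : l₁.Perm l₂) :
    (PySem.Set.ofList l₁).Perm (PySem.Set.ofList l₂) := by
  refine (List.perm_ext_iff_of_nodup (PySem.Set.nodup_ofList l₁) (PySem.Set.nodup_ofList l₂)).mpr ?_
  intro a
  rw [PySem.Set.mem_ofList, PySem.Set.mem_ofList]
  exact hp.mem_iff

theorem counter_values_perm (l₁ l₂ : List Int) (hp : l₁.Perm l₂) :
    (PySem.Dict.counter l₁).values.Perm (PySem.Dict.counter l₂).values := by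
  have hv : ∀ l : List Int, (PySem.Dict.counter l).values
      = (PySem.Set.ofList l).map (fun k => (l.count k : Int)) := by
    intro l
    show ((PySem.Dict.counter l).items).map (fun p => p.2) = _
    rw [PySem.Dict.items_counter, List.map_map]
    simp
  rw [hv, hv]
  have hcong : (PySem.Set.ofList l₁).map (fun k => (l₁.count k : Int))
      = (PySem.Set.ofList l₁).map (fun k => (l₂.count k : Int)) := by
    refine List.map_congr_left ?_
    intro a _
    rw [hp.count_eq]
  rw [hcong]
  exact (set_perm l₁ l₂ hp).map _

theorem counter_size_perm (l₁ l₂ : List Int) (hp : l₁.Perm l₂) :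
    (PySem.Dict.counter l₁).size = (PySem.Dict.counter l₂).size := by
  show (PySem.Dict.counter l₁).items.length = (PySem.Dict.counter l₂).items.length
  rw [PySem.Dict.items_counter, PySem.Dict.items_counter]
  simp only [List.length_map]
  exact (set_perm l₁ l₂ hp).length_eq

theorem catStats_counter_perm (l₁ l₂ : List Int) (hp : l₁.Perm l₂) :
    catStats (PySem.Dict.counter l₁) = catStats (PySem.Dict.counter l₂) := by
  unfold catStats
  rw [max?_id_perm _ _ (counter_values_perm l₁ l₂ hp), counter_size_perm l₁ l₂ hp]

theorem hand_value_eq (l : List Int) (bid : Int) (orig : List Int) :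
    hand_value (l, bid) (some orig) = catStats (PySem.Dict.counter l) :: orig := by
  unfold hand_value catStats catOf
  simp only [Option.getD_some]
  have hperm : ((PySem.List.sorted (PySem.Dict.counter l).items (fun p => p.2) true).map
      (fun p => p.2)).Perm (PySem.Dict.counter l).values :=
    (PySem.List.sorted_perm _ _ _).map _
  rw [max?_id_perm _ _ hperm]
  have hlen : ((PySem.List.sorted (PySem.Dict.counter l).items (fun p => p.2) true).length : Int)
      = ((PySem.Dict.counter l).size : Int) := by
    rw [PySem.List.length_sorted]; rfl
  simp only [hlen]
  split_ifs <;> rfl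

theorem gen_mem (n : Nat) : ∀ jv : List Int,
    jv ∈ generate_joker_values n ↔ jv.length = n ∧ ∀ x ∈ jv, 2 ≤ x ∧ x < 15 := by
  induction n with
  | zero =>
      intro jv
      simp [generate_joker_values, List.length_eq_zero_iff]
      intro h; subst h; simp
  | succ n ih =>
      intro jv
      simp only [generate_joker_values, List.mem_flatMap, List.mem_map]
      constructor
      · rintro ⟨i, hi, t, ht, rfl⟩
        rw [PySem.List.mem_pyRange_one] at hi
        obtain ⟨hl, hb⟩ := (ih t).1 ht
        refine ⟨by simp [hl], ?_⟩
        intro x hx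
        rcases List.mem_cons.1 hx with rfl | hx
        · exact ⟨by omega, by omega⟩
        · exact hb x hx
      · rintro ⟨hl, hb⟩
        match jv with
        | [] => simp at hl
        | a :: t =>
            have ha := hb a (by simp)
            refine ⟨a, ?_, t, (ih t).2 ⟨by simpa using hl, fun x hx => hb x (by simp [hx])⟩, rfl⟩
            rw [PySem.List.mem_pyRange_one]; omega

theorem nondecr_sub (n : Nat) : ∀ (lo : Int) (jv : List Int), jv ∈ nondecr n lo →
    jv.length = n ∧ ∀ x ∈ jv, lo ≤ x ∧ x < 15 := by
  induction n with
  | zero =>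
      intro lo jv h
      simp [nondecr] at h; subst h; simp
  | succ n ih =>
      intro lo jv h
      simp only [nondecr, List.mem_flatMap, List.mem_map] at h
      obtain ⟨i, hi, t, ht, rfl⟩ := h
      rw [PySem.List.mem_pyRange_one] at hi
      obtain ⟨hl, hb⟩ := ih i t ht
      refine ⟨by simp [hl], ?_⟩
      intro x hx
      rcases List.mem_cons.1 hx with rfl | hx
      · exact ⟨hi.1, hi.2⟩
      · have := hb x hx; exact ⟨by omega, this.2⟩

theorem nondecr_mem_of_sorted : ∀ (jv : List Int) (n : Nat) (lo : Int),
    jv.Pairwise (· ≤ ·) → jv.length = n → (∀ x ∈ jv, lo ≤ x ∧ x < 15) → jv ∈ nondecr n lo := by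
  intro jv
  induction jv with
  | nil =>
      intro n lo _ hl _
      simp at hl; subst hl; simp [nondecr]
  | cons a t ih =>
      intro n lo hp hl hb
      match n with
      | 0 => simp at hl
      | n + 1 =>
          simp only [nondecr, List.mem_flatMap, List.mem_map]
          have ha := hb a (by simp)
          refine ⟨a, ?_, t, ?_, rfl⟩
          · rw [PySem.List.mem_pyRange_one]; exact ⟨ha.1, ha.2⟩
          · refine ih n a (hp.sublist (List.sublist_cons_self a t)) (by simpa using hl) ?_
            intro x hx
            exact ⟨(List.pairwise_cons.1 hp).1 x hx, (hb x (by simp [hx])).2⟩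

theorem foldPhi (cs : List Int) : ∀ (b : Int) (orig : List Int), (∀ c ∈ cs, 0 ≤ c) →
    cs.foldl (fun mv c => if pyLt mv (c :: orig) then c :: orig else mv) (phi orig b)
      = phi orig (cs.foldl max b) := by
  induction cs with
  | nil => intro b orig _; rfl
  | cons c cs ih =>
      intro b orig hnn
      have hc : (0:Int) ≤ c := hnn c (by simp)
      have hstep : (if pyLt (phi orig b) (c :: orig) then c :: orig else phi orig b)
          = phi orig (max b c) := by
        by_cases hb : b < 0
        · have : pyLt (phi orig b) (c :: orig) = true := by simp [phi, hb, pyLt]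
          rw [this]
          simp only [if_true]
          have : max b c = c := by omega
          rw [this, phi, if_neg (by omega)]
        · have hphi : phi orig b = b :: orig := by rw [phi, if_neg hb]
          rw [hphi]
          by_cases hlt : b < c
          · have : pyLt (b :: orig) (c :: orig) = true := by
              simp [pyLt, hlt]
            rw [this, if_pos rfl]
            have : max b c = c := by omega
            rw [this, phi, if_neg (by omega)]
          · have : pyLt (b :: orig) (c :: orig) = false := by
              simp [pyLt, pyLt_self]
              omega
            rw [this]
            simp only [Bool.false_eq_true, if_false]
            have : max b c = b := by omega
            rw [this, hphi]
      rw [List.foldl_cons, hstep, List.foldl_cons]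
      exact ih (max b c) orig (fun x hx => hnn x (by simp [hx]))

theorem foldl_max_eq (xs ys : List Int) (i : Int)
    (h1 : ∀ x ∈ xs, ∃ y ∈ ys, x ≤ y) (h2 : ∀ y ∈ ys, ∃ x ∈ xs, y ≤ x) :
    xs.foldl max i = ys.foldl max i := by
  have bx := PySem.List.le_foldl_max xs i
  have by_ := PySem.List.le_foldl_max ys i
  have le1 : xs.foldl max i ≤ ys.foldl max i := by
    rcases PySem.List.foldl_max_mem xs i with h | h
    · rw [h]; exact by_.1
    · obtain ⟨y, hy, hle⟩ := h1 _ h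
      exact le_trans hle (by_.2 y hy)
  have le2 : ys.foldl max i ≤ xs.foldl max i := by
    rcases PySem.List.foldl_max_mem ys i with h | h
    · rw [h]; exact bx.1
    · obtain ⟨x, hx, hle⟩ := h2 _ h
      exact le_trans hle (bx.2 x hx)
  exact le_antisymm le1 le2

theorem update_counter (rest jv : List Int) :
    jv.foldl (fun d x => d.modify x 0 (· + 1)) (PySem.Dict.counter rest)
      = PySem.Dict.counter (rest ++ jv) := by
  rw [PySem.Dict.counter_eq_foldl, PySem.Dict.counter_eq_foldl, List.foldl_append]

theorem fold_spec (hand1 : List Int) (bid : Int) :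
    ∀ (L : List (List Int)) (h mv : List Int),
    h.length = hand1.length →
    (h = hand1 ∨ ∃ jv0, hand1.count 1 ≤ jv0.length ∧ h = merge2 hand1 hand1 jv0) →
    (∀ jv ∈ L, jv.length = hand1.count 1) →
    (L.foldl (stepA hand1 bid) (h, mv)).2
      = L.foldl (fun mv jv =>
          if pyLt mv (catStats (PySem.Dict.counter (merge2 hand1 hand1 jv)) :: hand1)
          then catStats (PySem.Dict.counter (merge2 hand1 hand1 jv)) :: hand1 else mv) mv := by
  intro L
  induction L with
  | nil => intro h mv _ _ _; rfl
  | cons jv L ih =>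
      intro h mv hlen hinv hL
      have hjv : jv.length = hand1.count 1 := hL jv (by simp)
      have hsub : ((jokersOf hand1).zip jv).foldl (fun h p => h.set p.1.toNat p.2) h
          = merge2 hand1 h jv := subst_eq_merge2 hand1 h jv hlen
      have hhand : merge2 hand1 h jv = merge2 hand1 hand1 jv := by
        rcases hinv with rfl | ⟨jv0, hc0, rfl⟩
        · rfl
        · exact merge2_overwrite hand1 hand1 jv jv0 rfl (by omega)
      rw [List.foldl_cons, List.foldl_cons]
      have hstep : stepA hand1 bid (h, mv) jv
          = (merge2 hand1 hand1 jv,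
             if pyLt mv (catStats (PySem.Dict.counter (merge2 hand1 hand1 jv)) :: hand1)
             then catStats (PySem.Dict.counter (merge2 hand1 hand1 jv)) :: hand1 else mv) := by
        unfold stepA
        simp only [hsub, hhand, hand_value_eq]
      rw [hstep]
      exact ih _ _ (by rw [merge2_length hand1 hand1 jv rfl])
        (Or.inr ⟨jv, by omega, rfl⟩) (fun x hx => hL x (by simp [hx]))

theorem if_lt_max (a b : Int) : (if a < b then b else a) = max a b := by
  rcases lt_or_ge a b with h | h
  · rw [if_pos h, max_eq_right h.le]
  · rw [if_neg (not_lt.2 h), max_eq_left h]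

theorem filter_count (l : List Int) :
    l.length - (l.filter (fun c => !(c == 1))).length = l.count 1 := by
  induction l with
  | nil => rfl
  | cons c t ih =>
      have hle := List.length_filter_le (fun c => !(c == 1)) t
      by_cases h : c = 1
      · subst h
        rw [List.count_cons_self, List.filter_cons_of_neg (by simp), List.length_cons]
        omega
      · rw [List.count_cons_of_ne h, List.filter_cons_of_pos (by simp [h]),
          List.length_cons, List.length_cons]
        omega

theorem A_closed (h_ : List Int × Int) (hand1 : List Int)
    (hh : hand1 = h_.1.map (fun c => if c != 11 then c else 1)) :
    hand_value2 h_ = phi hand1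
      (((generate_joker_values (hand1.count 1)).map
        (fun jv => catStats (PySem.Dict.counter (merge2 hand1 hand1 jv)))).foldl max (-1)) := by
  have h0 : hand_value2 h_ =
      ((generate_joker_values (jokersOf hand1).length).foldl (stepA hand1 h_.2) (hand1, [])).2 := by
    subst hh; rfl
  rw [h0, jokersOf_length]
  rw [fold_spec hand1 h_.2 _ hand1 [] rfl (Or.inl rfl)
    (fun jv hjv => ((gen_mem _ jv).1 hjv).1)]
  have h1 : ([] : List Int) = phi hand1 (-1) := rfl
  rw [h1, show List.foldl (fun mv jv =>
        if pyLt mv (catStats (PySem.Dict.counter (merge2 hand1 hand1 jv)) :: hand1)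
        then catStats (PySem.Dict.counter (merge2 hand1 hand1 jv)) :: hand1 else mv)
        (phi hand1 (-1)) (generate_joker_values (hand1.count 1))
      = List.foldl (fun mv c => if pyLt mv (c :: hand1) then c :: hand1 else mv) (phi hand1 (-1))
        ((generate_joker_values (hand1.count 1)).map
          (fun jv => catStats (PySem.Dict.counter (merge2 hand1 hand1 jv)))) from
      (List.foldl_map (f := fun jv => catStats (PySem.Dict.counter (merge2 hand1 hand1 jv)))
        (g := fun mv c => if pyLt mv (c :: hand1) then c :: hand1 else mv)).symm]
  exact foldPhi _ _ _ (by
    intro c hc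
    obtain ⟨jv, _, rfl⟩ := List.mem_map.1 hc
    exact catOf_nonneg _ _)

theorem B_closed (h_ : List Int × Int) (hand1 : List Int)
    (hh : hand1 = h_.1.map (fun c => if c == 11 then 1 else c)) :
    hand_value2_alt h_ =
      (((nondecr (hand1.count 1) 2).map
        (fun jv => catStats (PySem.Dict.counter (hand1.filter (fun c => !(c == 1)) ++ jv)))).foldl
          max (-1)) :: hand1 := by
  have h0 : hand_value2_alt h_ =
      ((nondecr (hand1.length - (hand1.filter (fun c => !(c == 1))).length) 2).foldl
        (fun best jv =>
          let c := catStats (jv.foldl (fun d x => d.modify x 0 (· + 1))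
            (PySem.Dict.counter (hand1.filter (fun c => !(c == 1)))))
          if best < c then c else best) (-1)) :: hand1 := by
    subst hh; rfl
  rw [h0, filter_count]
  congr 1
  have hfun : (fun (best : Int) (jv : List Int) =>
      let c := catStats (jv.foldl (fun d x => d.modify x 0 (· + 1))
        (PySem.Dict.counter (hand1.filter (fun c => !(c == 1)))))
      if best < c then c else best)
      = (fun best jv => max best
          (catStats (PySem.Dict.counter (hand1.filter (fun c => !(c == 1)) ++ jv)))) := by
    funext best jv
    show (if best < catStats (jv.foldl (fun d x => d.modify x 0 (· + 1))
        (PySem.Dict.counter (hand1.filter (fun c => !(c == 1))))) then _ else _) = _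
    rw [update_counter, if_lt_max]
  rw [hfun, show List.foldl (fun best jv => max best
        (catStats (PySem.Dict.counter (hand1.filter (fun c => !(c == 1)) ++ jv)))) (-1)
        (nondecr (hand1.count 1) 2)
      = List.foldl max (-1) ((nondecr (hand1.count 1) 2).map
        (fun jv => catStats (PySem.Dict.counter (hand1.filter (fun c => !(c == 1)) ++ jv)))) from
      (List.foldl_map
        (f := fun jv => catStats (PySem.Dict.counter (hand1.filter (fun c => !(c == 1)) ++ jv)))
        (g := max)).symm]

-- ===== VERDICT (by name: the statement is the Claim_ definition above) =====
theorem hand_value2_spec : Claim_equal_hand_value2 := by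
  intro h_ _ _
  unfold Spec_hand_value2
  have hmap : (fun c : Int => if c != 11 then c else 1)
      = (fun c : Int => if c == 11 then 1 else c) := by
    funext c; by_cases h : c = 11 <;> simp [h]
  set hand1 := h_.1.map (fun c => if c == 11 then 1 else c) with hh
  set rest := hand1.filter (fun c => !(c == 1)) with hr
  set F := fun jv => catStats (PySem.Dict.counter (rest ++ jv)) with hF
  set k := hand1.count 1 with hk
  rw [A_closed h_ hand1 (by rw [hmap]), B_closed h_ hand1 hh]
  have hmapA : (generate_joker_values k).map
      (fun jv => catStats (PySem.Dict.counter (merge2 hand1 hand1 jv)))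
      = (generate_joker_values k).map F := by
    refine List.map_congr_left ?_
    intro jv hjv
    have hlen : jv.length = k := ((gen_mem k jv).1 hjv).1
    exact catStats_counter_perm _ _ (merge2_perm hand1 jv (by rw [hlen, hk]))
  rw [hmapA]
  have hfold : ((generate_joker_values k).map F).foldl max (-1)
      = ((nondecr k 2).map F).foldl max (-1) := by
    refine foldl_max_eq _ _ _ ?_ ?_
    · intro x hx
      obtain ⟨jv, hjv, rfl⟩ := List.mem_map.1 hx
      obtain ⟨hlen, hbnd⟩ := (gen_mem k jv).1 hjv
      refine ⟨F (PySem.List.sorted jv (fun x => x) false), List.mem_map.2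
        ⟨PySem.List.sorted jv (fun x => x) false, ?_, rfl⟩, ?_⟩
      · refine nondecr_mem_of_sorted _ k 2 ?_ ?_ ?_
        · have := PySem.List.sorted_pairwise jv (fun x => x)
          simpa using this
        · rw [PySem.List.length_sorted, hlen]
        · intro x hx
          exact hbnd x ((PySem.List.mem_sorted _ _ _ _).1 hx)
      · have hp : jv.Perm (PySem.List.sorted jv (fun x => x) false) :=
          (PySem.List.sorted_perm _ _ _).symm
        rw [hF]
        exact le_of_eq (catStats_counter_perm _ _ (hp.append_left rest))
    · intro y hy
      obtain ⟨jv, hjv, rfl⟩ := List.mem_map.1 hy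
      obtain ⟨hlen, hbnd⟩ := nondecr_sub k 2 jv hjv
      exact ⟨F jv, List.mem_map.2 ⟨jv, (gen_mem k jv).2 ⟨hlen, hbnd⟩, rfl⟩, le_refl _⟩
  rw [hfold]
  have hnn : 0 ≤ ((nondecr k 2).map F).foldl max (-1) := by
    have hmem : List.replicate k (2 : Int) ∈ nondecr k 2 := by
      refine nondecr_mem_of_sorted _ k 2 ?_ (by simp) ?_
      · exact List.pairwise_replicate_of_refl
      · intro x hx
        rw [List.eq_of_mem_replicate hx]; constructor <;> norm_num
    have h2 := (PySem.List.le_foldl_max (((nondecr k 2).map F)) (-1)).2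
      (F (List.replicate k 2)) (List.mem_map.2 ⟨_, hmem, rfl⟩)
    have h3 : 0 ≤ F (List.replicate k 2) := catOf_nonneg _ _
    omega
  rw [phi, if_neg (by omega)]
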